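-- pv_equiv track=rewrite | github.com/vios-s/kubmonitor_cli | mock_data.py | _generate_mock_logs
-- ===== SOURCE A (Python) =====
-- def _generate_mock_logs(tail_lines=100):
--     """Generate mock log data."""
--     mock_logs = []
--     log_messages = [
--         "INFO: Starting application...",
--         "INFO: Loading configuration from /etc/config/app.yaml",
--         "INFO: Connecting to database...",
--         "INFO: Database connection established",
--         "INFO: Initializing worker threads...",
--         "DEBUG: Worker pool size: 4",
--         "INFO: Processing batch 1/10",
--         "INFO: Processing batch 2/10",
--         "WARNING: High memory usage detected (85%)",
--         "INFO: Processing batch 3/10",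
--         "INFO: Processing batch 4/10",
--         "DEBUG: Cache hit ratio: 0.87",
--         "INFO: Processing batch 5/10",
--         "ERROR: Failed to process item #42: timeout",
--         "INFO: Retrying item #42...",
--         "INFO: Processing batch 6/10",
--         "INFO: Processing batch 7/10",
--         "INFO: Processing batch 8/10",
--         "DEBUG: Checkpoint saved",
--         "INFO: Processing batch 9/10",
--         "INFO: Processing batch 10/10",
--         "INFO: All batches completed successfully",
--         "INFO: Cleaning up resources...",
--         "INFO: Application finished",
--     ]
--
--     # Repeat messages if needed to fill tail_lines
--     while len(log_messages) < tail_lines: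
--         log_messages.extend(log_messages)
--
--     for i, msg in enumerate(log_messages[:tail_lines]):
--         timestamp = f"2026-01-21T10:{i:02d}:00Z"
--         mock_logs.append(f"{timestamp} {msg}")
--     return "\n".join(mock_logs)
-- ===== SOURCE B (Python) =====
-- def _generate_mock_logs(tail_lines=100):
--     """Generate mock log data."""
--     log_messages = [
--         "INFO: Starting application...",
--         "INFO: Loading configuration from /etc/config/app.yaml",
--         "INFO: Connecting to database...",
--         "INFO: Database connection established",
--         "INFO: Initializing worker threads...",
--         "DEBUG: Worker pool size: 4",
--         "INFO: Processing batch 1/10",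
--         "INFO: Processing batch 2/10",
--         "WARNING: High memory usage detected (85%)",
--         "INFO: Processing batch 3/10",
--         "INFO: Processing batch 4/10",
--         "DEBUG: Cache hit ratio: 0.87",
--         "INFO: Processing batch 5/10",
--         "ERROR: Failed to process item #42: timeout",
--         "INFO: Retrying item #42...",
--         "INFO: Processing batch 6/10",
--         "INFO: Processing batch 7/10",
--         "INFO: Processing batch 8/10",
--         "DEBUG: Checkpoint saved",
--         "INFO: Processing batch 9/10",
--         "INFO: Processing batch 10/10",
--         "INFO: All batches completed successfully",
--         "INFO: Cleaning up resources...",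
--         "INFO: Application finished",
--     ]
--     n = len(log_messages)
--     return "\n".join(
--         f"2026-01-21T10:{i:02d}:00Z {log_messages[i % n]}"
--         for i in range(tail_lines)
--     )
-- ===== Notes on version B (the rewrite author's own statement) =====
-- stated objective: simpler
-- what changed: Replaces the geometric list-doubling loop plus slice-and-enumerate with a single pass over range(tail_lines) that cycles through the 24 base messages by index modulo.
-- intended difference: For -24 < tail_lines < 0, A's slice log_messages[:tail_lines] accidentally emits all but the last |tail_lines| base messages, while B returns the empty string, the intended result for a nonpositive requested line count. — e.g. on _generate_mock_logs(-23): A returns "2026-01-21T10:00:00Z INFO: Starting application...", B returns ""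
import Mathlib
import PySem

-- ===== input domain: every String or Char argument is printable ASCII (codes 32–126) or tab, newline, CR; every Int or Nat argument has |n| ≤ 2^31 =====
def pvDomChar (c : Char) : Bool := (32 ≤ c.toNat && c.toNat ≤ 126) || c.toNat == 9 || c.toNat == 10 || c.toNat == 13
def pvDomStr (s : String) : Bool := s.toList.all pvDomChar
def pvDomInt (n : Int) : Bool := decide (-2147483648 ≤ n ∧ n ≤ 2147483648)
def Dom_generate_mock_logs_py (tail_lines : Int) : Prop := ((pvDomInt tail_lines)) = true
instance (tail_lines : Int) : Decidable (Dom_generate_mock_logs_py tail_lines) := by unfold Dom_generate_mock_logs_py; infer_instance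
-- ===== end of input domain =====

set_option maxRecDepth 8000
set_option maxHeartbeats 2000000


-- B replaces A's geometric list doubling + slice + enumerate with a single pass over
-- range(tail_lines) cycling the 24 base messages by index modulo (objective: simpler);
-- for -24 < tail_lines < 0 the two differ (see D_ below).

-- the 24 literal base messages (the same literal list appears in Source A and Source B)
def pvMsgs : List String := [
  "INFO: Starting application...",
  "INFO: Loading configuration from /etc/config/app.yaml",
  "INFO: Connecting to database...",
  "INFO: Database connection established",
  "INFO: Initializing worker threads...",
  "DEBUG: Worker pool size: 4",
  "INFO: Processing batch 1/10",
  "INFO: Processing batch 2/10",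
  "WARNING: High memory usage detected (85%)",
  "INFO: Processing batch 3/10",
  "INFO: Processing batch 4/10",
  "DEBUG: Cache hit ratio: 0.87",
  "INFO: Processing batch 5/10",
  "ERROR: Failed to process item #42: timeout",
  "INFO: Retrying item #42...",
  "INFO: Processing batch 6/10",
  "INFO: Processing batch 7/10",
  "INFO: Processing batch 8/10",
  "DEBUG: Checkpoint saved",
  "INFO: Processing batch 9/10",
  "INFO: Processing batch 10/10",
  "INFO: All batches completed successfully",
  "INFO: Cleaning up resources...",
  "INFO: Application finished"]

-- Python f"{i:02d}" for the nonnegative loop indices both programs produce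
-- (both call sites only ever pass the enumerate/range index, which is ≥ 0)
def pvFmt02 (i : Int) : String :=
  if i < 10 then "0" ++ PySem.Int.toStr i else PySem.Int.toStr i

-- ===== PORT A =====
-- 'while len(log_messages) < tail_lines: log_messages.extend(log_messages)'
-- (the '0 < xs.length' conjunct is only a totality guard: it is unreachable from the
-- call site, where xs is the nonempty literal list and the Python loop terminates)
def pvGrow (t : Int) (xs : List String) : List String :=
  if _h : 0 < xs.length ∧ (xs.length : Int) < t then pvGrow t (xs ++ xs) else xs
termination_by (t - xs.length).toNat
decreasing_by simp only [List.length_append]; omega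

def generate_mock_logs_py (tail_lines : Int) : String :=
  let log_messages := pvGrow tail_lines pvMsgs
  let sliced := PySem.List.slice log_messages none (some tail_lines)
  let mock_logs := (PySem.List.enumerate sliced 0).map (fun p =>
    let timestamp := "2026-01-21T10:" ++ pvFmt02 p.1 ++ ":00Z"
    timestamp ++ " " ++ p.2)
  PySem.Str.join "\n" mock_logs

-- ===== PORT B =====
def generate_mock_logs_py_alt (tail_lines : Int) : String :=
  let n : Int := (pvMsgs.length : Int)
  -- 'log_messages[i % n]' always succeeds (0 ≤ i % n < n), so pyGetD's default is never used
  PySem.Str.join "\n" ((PySem.List.pyRange 0 tail_lines 1).map (fun i =>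
    "2026-01-21T10:" ++ pvFmt02 i ++ ":00Z " ++ PySem.List.pyGetD pvMsgs (PySem.Int.mod i n) ""))

-- ===== PRECONDITION & SPEC =====
-- For -24 < tail_lines < 0, A's slice log_messages[:tail_lines] accidentally emits all but
-- the last |tail_lines| base messages, while B returns the empty string, the intended
-- result for a nonpositive requested line count.
def D_generate_mock_logs_py (tail_lines : Int) : Prop := -24 < tail_lines ∧ tail_lines < 0
instance (tail_lines : Int) : Decidable (D_generate_mock_logs_py tail_lines) := by unfold D_generate_mock_logs_py; infer_instance

def Spec_generate_mock_logs_py (tail_lines : Int) (out : String) : Prop := ¬ D_generate_mock_logs_py tail_lines → out = generate_mock_logs_py_alt tail_lines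
instance (tail_lines : Int) (out : String) : Decidable (Spec_generate_mock_logs_py tail_lines out) := by unfold Spec_generate_mock_logs_py; infer_instance

def pvDiffWitness_generate_mock_logs_py : Int := -23
def pvDiffWitnessOut_generate_mock_logs_py : String × String :=
  ("2026-01-21T10:00:00Z INFO: Starting application...", "")

-- ===== CLAIM (what is proved, stated in full; the proofs are below) =====
def Claim_unchanged_generate_mock_logs_py : Prop := ∀ (tail_lines : Int), Dom_generate_mock_logs_py tail_lines → Spec_generate_mock_logs_py tail_lines (generate_mock_logs_py tail_lines)
def Claim_changed_generate_mock_logs_py : Prop := Dom_generate_mock_logs_py (pvDiffWitness_generate_mock_logs_py) ∧ D_generate_mock_logs_py (pvDiffWitness_generate_mock_logs_py) ∧ generate_mock_logs_py (pvDiffWitness_generate_mock_logs_py) = pvDiffWitnessOut_generate_mock_logs_py.1 ∧ generate_mock_logs_py_alt (pvDiffWitness_generate_mock_logs_py) = pvDiffWitnessOut_generate_mock_logs_py.2 ∧ pvDiffWitnessOut_generate_mock_logs_py.1 ≠ pvDiffWitnessOut_generate_mock_logs_py.2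
def Claim_exact_generate_mock_logs_py : Prop := ∀ (tail_lines : Int), Dom_generate_mock_logs_py tail_lines → D_generate_mock_logs_py tail_lines → generate_mock_logs_py tail_lines ≠ generate_mock_logs_py_alt tail_lines

-- ===== LEMMAS AND PROOFS =====

theorem pvMsgs_len : pvMsgs.length = 24 := rfl

-- pvGrow only ever concatenates the list with itself, so every element of the result is
-- the base element at the index mod 24, and 24 keeps dividing the length
theorem pvGrow_cyclic (t : Int) (xs : List String)
    (hdvd : 24 ∣ xs.length)
    (hcyc : ∀ k, k < xs.length → xs.getD k "" = pvMsgs.getD (k % 24) "") :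
    24 ∣ (pvGrow t xs).length ∧
      ∀ k, k < (pvGrow t xs).length → (pvGrow t xs).getD k "" = pvMsgs.getD (k % 24) "" := by
  fun_induction pvGrow t xs with
  | case1 xs h ih =>
    apply ih
    · simpa [List.length_append] using Dvd.dvd.add hdvd hdvd
    · intro k hk
      obtain ⟨c, hc⟩ := hdvd
      simp only [List.length_append] at hk
      by_cases hlt : k < xs.length
      · rw [List.getD_append xs xs "" k hlt]; exact hcyc k hlt
      · rw [List.getD_append_right xs xs "" k (by omega)]
        rw [hcyc (k - xs.length) (by omega)]
        congr 1
        omega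
  | case2 xs _ => exact ⟨hdvd, hcyc⟩

-- pvGrow reaches a list at least t long (from any nonempty start)
theorem pvGrow_len (t : Int) (xs : List String) (hne : 0 < xs.length) :
    t ≤ ((pvGrow t xs).length : Int) := by
  fun_induction pvGrow t xs with
  | case1 xs h ih => exact ih (by simp [List.length_append]; omega)
  | case2 xs h =>
    rcases not_and_or.mp h with h1 | h2
    · omega
    · omega

theorem pvGrow_of_le (t : Int) (xs : List String) (h : t ≤ (xs.length : Int)) :
    pvGrow t xs = xs := by
  rw [pvGrow, dif_neg (by omega : ¬(0 < xs.length ∧ (xs.length : Int) < t))]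

-- A's k-th line equals B's k-th line, for any index i and message
theorem pvLine_eq (i : Int) (m : String) :
    ("2026-01-21T10:" ++ pvFmt02 i ++ ":00Z") ++ " " ++ m
      = "2026-01-21T10:" ++ pvFmt02 i ++ ":00Z " ++ m := by
  have h : (((":00Z" : String) ++ " ") : String) = ":00Z " := by decide
  simp only [String.append_assoc, ← h]

-- both line lists coincide: A maps over enumerate(taken prefix), B maps over the range
theorem pvLines_eq (t : Int) (_ht : 0 ≤ t) (L : List String) (hlen : t ≤ (L.length : Int))
    (hcyc : ∀ k, k < L.length → L.getD k "" = pvMsgs.getD (k % 24) "") :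
    (PySem.List.enumerate (L.take t.toNat) 0).map (fun p =>
        ("2026-01-21T10:" ++ pvFmt02 p.1 ++ ":00Z") ++ " " ++ p.2)
      = (PySem.List.pyRange 0 t 1).map (fun i =>
          "2026-01-21T10:" ++ pvFmt02 i ++ ":00Z " ++
            PySem.List.pyGetD pvMsgs (PySem.Int.mod i (pvMsgs.length : Int)) "") := by
  have htake : (L.take t.toNat).length = t.toNat := by
    simp only [List.length_take]; omega
  apply List.ext_getElem
  · simp [PySem.List.length_enumerate, PySem.List.length_pyRange_one, htake]
  · intro k h1 h2
    simp only [List.getElem_map, PySem.List.getElem_enumerate, PySem.List.getElem_pyRange_one]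
    rw [pvLine_eq]
    have hk : k < t.toNat := by
      simpa [PySem.List.length_enumerate, htake] using h1
    have hkL : k < L.length := by omega
    have hidx : (0 : Int) + (k : Nat) = ((k : Nat) : Int) := by ring
    have hmsg : (L.take t.toNat)[k]'(by omega) =
        PySem.List.pyGetD pvMsgs (PySem.Int.mod ((k : Nat) : Int) ((pvMsgs.length : Nat) : Int)) "" := by
      have h1' : (L.take t.toNat)[k]'(by omega) = L[k]'hkL := List.getElem_take
      have h2' : L[k]'hkL = L.getD k "" := (List.getD_eq_getElem L "" hkL).symm
      rw [h1', h2', hcyc k hkL]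
      rw [show ((pvMsgs.length : Nat) : Int) = ((24 : Nat) : Int) from by rw [pvMsgs_len]]
      rw [PySem.Int.mod_natCast k 24, PySem.List.pyGetD_natCast]
    rw [hidx, hmsg]

-- pvGrow does not reduce by `decide` (well-founded recursion); for t ≤ 24 the while
-- loop body never runs, which lets the witness/tightness goals be evaluated
theorem pvA_unfold (t : Int) (h : t ≤ 24) :
    generate_mock_logs_py t =
      PySem.Str.join "\n" ((PySem.List.enumerate (PySem.List.slice pvMsgs none (some t)) 0).map
        (fun p => ("2026-01-21T10:" ++ pvFmt02 p.1 ++ ":00Z") ++ " " ++ p.2)) := by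
  simp only [generate_mock_logs_py, pvGrow_of_le t pvMsgs (by rw [pvMsgs_len]; omega)]

-- ===== VERDICT (by name: the statement is the Claim_ definition above) =====
theorem generate_mock_logs_py_spec : Claim_unchanged_generate_mock_logs_py := by
  intro t _ hnd
  simp only [generate_mock_logs_py, generate_mock_logs_py_alt]
  by_cases ht : 0 ≤ t
  · -- nonnegative: the doubled list is ≥ t long, the slice is take t
    have hbase : (24 : Nat) ∣ pvMsgs.length := by rw [pvMsgs_len]
    have hcyc0 : ∀ k, k < pvMsgs.length → pvMsgs.getD k "" = pvMsgs.getD (k % 24) "" := by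
      intro k hk
      have : k % 24 = k := Nat.mod_eq_of_lt (by rw [pvMsgs_len] at hk; exact hk)
      rw [this]
    obtain ⟨hdvd, hcyc⟩ := pvGrow_cyclic t pvMsgs hbase hcyc0
    have hlen : t ≤ ((pvGrow t pvMsgs).length : Int) := pvGrow_len t pvMsgs (by rw [pvMsgs_len]; omega)
    rw [PySem.List.slice_to _ ht]
    exact congrArg (PySem.Str.join "\n") (pvLines_eq t ht _ hlen hcyc)
  · -- negative and outside D_: t ≤ -24, so the slice is empty and the range is empty
    have ht24 : t ≤ -24 := by
      simp only [D_generate_mock_logs_py, not_and, not_lt] at hnd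
      omega
    have hgrow : pvGrow t pvMsgs = pvMsgs := pvGrow_of_le t pvMsgs (by rw [pvMsgs_len]; omega)
    rw [hgrow]
    have hk : 0 < (-t).toNat := by omega
    have hts : (some t) = some (-(((-t).toNat : Nat) : Int)) := by congr 1; omega
    rw [hts, PySem.List.slice_to_neg_natCast _ _ hk]
    have htake0 : pvMsgs.length - (-t).toNat = 0 := by rw [pvMsgs_len]; omega
    rw [htake0, List.take_zero]
    have hrange : PySem.List.pyRange 0 t 1 = [] := by
      simp [PySem.List.pyRange]; omega
    rw [hrange]
    rfl

theorem generate_mock_logs_py_changed : Claim_changed_generate_mock_logs_py := by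
  unfold Claim_changed_generate_mock_logs_py
  refine ⟨by decide, by decide, ?_, by decide, by decide⟩
  rw [pvA_unfold pvDiffWitness_generate_mock_logs_py (by decide)]
  decide

theorem generate_mock_logs_py_tight : Claim_exact_generate_mock_logs_py := by
  intro t _ hd
  obtain ⟨h1, h2⟩ := hd
  interval_cases t <;> (rw [pvA_unfold _ (by decide)]; decide)
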